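-- pv_equiv track=rewrite | github.com/builamquangngoc91/BigO-Coding | Green/Lesson_4/extra_2.py | remove_zero_from_number
-- ===== SOURCE A (Python) =====
-- def remove_zero_from_number(number_param):
--     temp = 0
--
--     len = 1
--     while number_param > 0:
--         if number_param % 10 != 0:
--             temp += (number_param % 10) * (10 ** (len - 1))
--             len += 1
--         number_param //= 10
--
--     return temp
-- ===== SOURCE B (Python) =====
-- def remove_zero_from_number(number_param):
--     if number_param <= 0:
--         return 0
--     rest = remove_zero_from_number(number_param // 10)
--     d = number_param % 10
--     return rest if d == 0 else rest * 10 + d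
-- ===== Notes on version B (the rewrite author's own statement) =====
-- stated objective: simpler
-- what changed: Replaced the while-loop that accumulates nonzero digits least-significant-first with an explicit output-position counter and recomputed powers of ten by a top-down recursion that rebuilds the surviving digits Horner-style (rest times ten plus digit), eliminating the counter and the power computation entirely.
import Mathlib
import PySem

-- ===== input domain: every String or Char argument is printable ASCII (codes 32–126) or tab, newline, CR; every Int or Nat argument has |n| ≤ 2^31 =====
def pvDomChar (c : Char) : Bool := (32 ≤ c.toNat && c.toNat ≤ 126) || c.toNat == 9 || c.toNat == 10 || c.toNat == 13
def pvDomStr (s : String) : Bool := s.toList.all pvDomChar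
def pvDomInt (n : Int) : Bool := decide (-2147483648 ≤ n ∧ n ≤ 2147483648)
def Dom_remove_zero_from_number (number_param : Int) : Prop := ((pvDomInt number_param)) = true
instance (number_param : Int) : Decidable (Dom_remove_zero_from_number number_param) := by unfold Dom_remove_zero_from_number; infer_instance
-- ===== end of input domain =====

-- B replaces A's digit loop (accumulator, position counter, recomputed powers of ten)
-- by a top-down recursion that rebuilds the surviving digits Horner-style (simpler).


-- termination helper for both ports (cited in decreasing_by)
theorem pvFloordiv10_toNat_lt (n : Int) (h : 0 < n) :
    (PySem.Int.floordiv n 10).toNat < n.toNat := by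
  have e : PySem.Int.floordiv n 10 = n / 10 := by
    simp [PySem.Int.floordiv, Int.fdiv_eq_ediv]
  rw [e]; omega

-- ===== PORT A =====
-- the while-loop, state (number_param, temp, len); 10 ** (len - 1) has len ≥ 1 on every
-- call in A, so the exponent is the nonnegative int (len - 1), ported as (len - 1).toNat
def removeZeroLoop (number_param temp len : Int) : Int :=
  if h : 0 < number_param then
    if PySem.Int.mod number_param 10 ≠ 0 then
      removeZeroLoop (PySem.Int.floordiv number_param 10)
        (temp + PySem.Int.mod number_param 10 * 10 ^ (len - 1).toNat) (len + 1)
    else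
      removeZeroLoop (PySem.Int.floordiv number_param 10) temp len
  else
    temp
termination_by number_param.toNat
decreasing_by all_goals exact pvFloordiv10_toNat_lt number_param h

def remove_zero_from_number (number_param : Int) : Int :=
  removeZeroLoop number_param 0 1

-- ===== PORT B =====
def remove_zero_from_number_alt (number_param : Int) : Int :=
  if h : number_param ≤ 0 then
    0
  else
    let rest := remove_zero_from_number_alt (PySem.Int.floordiv number_param 10)
    let d := PySem.Int.mod number_param 10
    if d = 0 then rest else rest * 10 + d
termination_by number_param.toNat
decreasing_by exact pvFloordiv10_toNat_lt number_param (by omega)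

-- ===== PRECONDITION & SPEC =====
def Spec_remove_zero_from_number (number_param : Int) (out : Int) : Prop := out = remove_zero_from_number_alt number_param
instance (number_param : Int) (out : Int) : Decidable (Spec_remove_zero_from_number number_param out) := by unfold Spec_remove_zero_from_number; infer_instance

-- ===== CLAIM (what is proved, stated in full; the proofs are below) =====
def Claim_equal_remove_zero_from_number : Prop := ∀ (number_param : Int), Dom_remove_zero_from_number number_param → Spec_remove_zero_from_number number_param (remove_zero_from_number number_param)

-- ===== LEMMAS AND PROOFS =====

theorem remove_zero_from_number_alt_nonpos (n : Int) (h : n ≤ 0) :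
    remove_zero_from_number_alt n = 0 := by
  rw [remove_zero_from_number_alt]; simp [h]

-- loop invariant: the loop adds B's value for the remaining number, shifted to position len-1
theorem removeZeroLoop_eq (k : Nat) : ∀ (n : Int), n.toNat ≤ k → ∀ temp len : Int, 1 ≤ len →
    removeZeroLoop n temp len = temp + remove_zero_from_number_alt n * 10 ^ (len - 1).toNat := by
  induction k with
  | zero =>
    intro n hn temp len _
    have hle : n ≤ 0 := by omega
    rw [removeZeroLoop]
    simp [show ¬ 0 < n by omega, remove_zero_from_number_alt_nonpos n hle]
  | succ k ih =>
    intro n hn temp len hlen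
    rw [removeZeroLoop]
    by_cases hpos : 0 < n
    · have hlt := pvFloordiv10_toNat_lt n hpos
      have hrec : (PySem.Int.floordiv n 10).toNat ≤ k := by omega
      have hle : ¬ n ≤ 0 := by omega
      by_cases hd : PySem.Int.mod n 10 = 0
      · rw [dif_pos hpos, if_neg (not_not_intro hd), ih _ hrec temp len hlen]
        conv_rhs => rw [remove_zero_from_number_alt]
        have hdvd : (10 : Int) ∣ n := (PySem.Int.mod_eq_zero_iff_dvd n 10).mp hd
        rw [dif_neg hle]
        simp [hdvd]
      · rw [dif_pos hpos, if_pos hd, ih _ hrec _ (len + 1) (by omega)]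
        conv_rhs => rw [remove_zero_from_number_alt]
        rw [dif_neg hle]
        simp only [if_neg hd]
        have hexp : (len + 1 - 1).toNat = (len - 1).toNat + 1 := by omega
        rw [show len + 1 - 1 = len by ring, show len.toNat = (len - 1).toNat + 1 from by omega]
        ring
    · have hle : n ≤ 0 := by omega
      simp [hpos, remove_zero_from_number_alt_nonpos n hle]

-- ===== VERDICT (by name: the statement is the Claim_ definition above) =====
theorem remove_zero_from_number_spec : Claim_equal_remove_zero_from_number := by
  intro n _
  unfold Spec_remove_zero_from_number remove_zero_from_number
  rw [removeZeroLoop_eq n.toNat n le_rfl 0 1 (by omega)]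
  simp
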